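-- pv_equiv track=rewrite | github.com/scottonanski/persistent-mind-model | pmm/struct_semantics.py | detect_ev_ids_and_hashes
-- ===== SOURCE A (Python) =====
-- def _strip_punct(tok: str) -> str:
--     """Strip leading/trailing punctuation around a token."""
--     if not tok:
--         return tok
--     return tok.strip("\"'\t\r\n.,;:!?()[]{}")
--
-- def detect_ev_ids_and_hashes(text: str) -> set[str]:
--     """Extract event IDs like 'ev123' and 16-char lowercase hex hashes from text without regex."""
--     if not text:
--         return set()
--     low = text.lower()
--     refs: set[str] = set()
--
--     # Scan tokens for 'ev' + digits and 16-char hex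
--     for raw in low.split():
--         tok = _strip_punct(raw)
--         if not tok:
--             continue
--         # ev + digits
--         if tok.startswith("ev") and tok[2:].isdigit():
--             refs.add(tok)
--             continue
--         # 16-char lowercase hex
--         if len(tok) == 16 and all(c in "0123456789abcdef" for c in tok):
--             refs.add(tok)
--
--     # Fallback: simple linear scan to catch ev123 inside punctuation without spaces
--     n = len(low)
--     i = 0
--     while i < n - 2:
--         if low[i] == "e" and low[i + 1] == "v":
--             j = i + 2
--             while j < n and low[j].isdigit():
--                 j += 1
--             if j > i + 2:
--                 refs.add(low[i:j])
--                 i = j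
--                 continue
--         i += 1
--     return refs
-- ===== SOURCE B (Python) =====
-- _PUNCT = "\"'\t\r\n.,;:!?()[]{}"
-- _HEX = "0123456789abcdef"
--
--
-- def _flush_word(word, word_hits):
--     """Word boundary: strip punctuation and record the token if it is a hit."""
--     t = word.strip(_PUNCT)
--     if t and ((t.startswith("ev") and t[2:].isdigit())
--               or (len(t) == 16 and all(c in _HEX for c in t))):
--         word_hits.append(t)
--
--
-- def _step_ev(cand, ev_hits, c):
--     """Advance the ev-candidate state machine; cand is '', 'e', or 'ev'+digits."""
--     if len(cand) >= 2:
--         if c.isdigit():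
--             return cand + c
--         if len(cand) > 2:
--             ev_hits.append(cand)
--         return "e" if c == "e" else ""
--     if cand == "e" and c == "v":
--         return "ev"
--     return "e" if c == "e" else ""
--
--
-- def detect_ev_ids_and_hashes(text: str) -> set[str]:
--     """Extract 'ev'+digits IDs and 16-char lowercase hex hashes in ONE character pass."""
--     word_hits = []   # hits from whitespace-delimited words, in word order
--     ev_hits = []     # 'ev'+digits runs, in position order
--     word = ""        # current word buffer
--     cand = ""        # current ev-candidate
--     for c in text.lower():
--         if c.isspace():
--             _flush_word(word, word_hits)
--             word = ""
--         else:
--             word += c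
--         cand = _step_ev(cand, ev_hits, c)
--     _flush_word(word, word_hits)
--     if len(cand) > 2:
--         ev_hits.append(cand)
--     return set(word_hits + ev_hits)
-- ===== Notes on version B (the rewrite author's own statement) =====
-- stated objective: alternative
-- what changed: A's two staged passes (split()+strip per token, then a separate index-arithmetic while-walk over the string with i=j resets) are replaced by ONE character-at-a-time pass that simultaneously segments words with a buffer and runs an explicit 'ev'+digits state machine, collecting hits into two lists and deduplicating once at the end instead of set-inserting throughout.
import Mathlib
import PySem

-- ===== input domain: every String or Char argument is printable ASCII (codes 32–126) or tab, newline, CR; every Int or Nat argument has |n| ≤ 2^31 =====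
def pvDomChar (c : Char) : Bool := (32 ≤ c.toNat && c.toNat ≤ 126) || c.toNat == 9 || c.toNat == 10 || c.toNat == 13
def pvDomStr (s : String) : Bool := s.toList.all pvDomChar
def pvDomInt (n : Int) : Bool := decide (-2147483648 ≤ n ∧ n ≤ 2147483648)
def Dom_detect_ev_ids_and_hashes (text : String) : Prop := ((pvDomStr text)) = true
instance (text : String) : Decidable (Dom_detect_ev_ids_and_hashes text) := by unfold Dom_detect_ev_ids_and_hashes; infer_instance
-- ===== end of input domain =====

-- B replaces A's split-token loop plus separate index-walk fallback by ONE character pass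
-- that segments words and runs an 'ev'+digits state machine simultaneously, deduplicating
-- once at the end (objective: alternative decomposition); equal results proved.

-- ===== PORT A =====
-- the punctuation set of _strip_punct and the hex alphabet (string literals in the Python)
def pvPunct : String := "\"'\t\r\n.,;:!?()[]{}"
def pvHex : List Char := "0123456789abcdef".toList

-- _strip_punct
def pvStripPunct (tok : String) : String :=
  if tok = "" then tok
  else PySem.Str.stripChars tok pvPunct

-- the inner `while j < n and low[j].isdigit():` of A's fallback; `low[j]` is in range
-- whenever read (j < n), so getD is exact
def pvSkipDigits (cl : List Char) (n j : Nat) : Nat :=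
  if h : j < n ∧ PySem.Chars.isdigit (cl.getD j ' ') = true then pvSkipDigits cl n (j + 1)
  else j
termination_by n - j
decreasing_by exact Nat.sub_lt_sub_left h.1 (Nat.lt_succ_self j)

-- A's fallback `while i < n - 2:` loop; indices are Nats (i, j only ever grow from 0, and
-- Python's `i < n - 2` is false for n ≤ 2 exactly as Nat truncated subtraction makes it);
-- `String.ofList ((cl.drop i).take (j - i))` is low[i:j]
def pvLoopA (cl : List Char) (n i : Nat) (refs : List String) : List String :=
  if hi : i < n - 2 then
    if cl.getD i ' ' = 'e' ∧ cl.getD (i + 1) ' ' = 'v' then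
      let j := pvSkipDigits cl n (i + 2)
      if hj : i + 2 < j then
        pvLoopA cl n j (PySem.Set.add refs (String.ofList ((cl.drop i).take (j - i))))
      else pvLoopA cl n (i + 1) refs
    else pvLoopA cl n (i + 1) refs
  else refs
termination_by n - i
decreasing_by
  · exact Nat.sub_lt_sub_left (Nat.lt_of_lt_of_le hi (Nat.sub_le n 2))
      (Nat.lt_of_le_of_lt (Nat.le_add_right i 2) hj)
  · exact Nat.sub_lt_sub_left (Nat.lt_of_lt_of_le hi (Nat.sub_le n 2)) (Nat.lt_succ_self i)
  · exact Nat.sub_lt_sub_left (Nat.lt_of_lt_of_le hi (Nat.sub_le n 2)) (Nat.lt_succ_self i)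

def detect_ev_ids_and_hashes (text : String) : List String :=
  if text = "" then []
  else
    let low := PySem.Str.lower text
    -- token pass: `c in "0123456789abcdef"` on the single chars of tok is char membership
    let refs := (PySem.Str.split₀ low).foldl (fun refs raw =>
      let tok := pvStripPunct raw
      if tok = "" then refs
      else if PySem.Str.startswith tok "ev" && PySem.Str.strIsdigit (PySem.Str.slice tok (some 2) none) then
        PySem.Set.add refs tok
      else if PySem.Str.len tok == 16 && tok.toList.all (fun c => pvHex.contains c) then
        PySem.Set.add refs tok
      else refs) PySem.Set.empty
    let cl := low.toList
    pvLoopA cl cl.length 0 refs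

-- ===== PORT B =====
-- the hit test of B's _flush_word: `t and (ev+digits or 16-char hex)`
def pvHit (t : String) : Bool :=
  (!(t == "")) &&
    ((PySem.Str.startswith t "ev" && PySem.Str.strIsdigit (PySem.Str.slice t (some 2) none))
      || (PySem.Str.len t == 16 && t.toList.all (fun c => pvHex.contains c)))

-- _flush_word: strip the buffered word and append it to word_hits if it is a hit
def pvFlushWord (word : List Char) (whits : List String) : List String :=
  let t := PySem.Str.stripChars (String.ofList word) pvPunct
  if pvHit t then whits ++ [t] else whits

-- the word half of the loop body: whitespace flushes, other chars extend the buffer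
def pvStepWord (word : List Char) (whits : List String) (c : Char) : List Char × List String :=
  if PySem.Chars.isspace c then ([], pvFlushWord word whits)
  else (word ++ [c], whits)

-- _step_ev: cand is [], ['e'], or 'e'::'v'::digits
def pvStepEv (cand : List Char) (ehits : List String) (c : Char) : List Char × List String :=
  if 2 ≤ cand.length then
    if PySem.Chars.isdigit c then (cand ++ [c], ehits)
    else ((if c = 'e' then ['e'] else []),
          if 2 < cand.length then ehits ++ [String.ofList cand] else ehits)
  else if cand = ['e'] ∧ c = 'v' then (['e', 'v'], ehits)
  else ((if c = 'e' then ['e'] else []), ehits)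

def detect_ev_ids_and_hashes_alt (text : String) : List String :=
  let st := (PySem.Str.lower text).toList.foldl
    (fun (st : (List Char × List String) × (List Char × List String)) c =>
      (pvStepWord st.1.1 st.1.2 c, pvStepEv st.2.1 st.2.2 c)) (([], []), ([], []))
  let whits := pvFlushWord st.1.1 st.1.2
  let ehits := if 2 < st.2.1.length then st.2.2 ++ [String.ofList st.2.1] else st.2.2
  PySem.Set.ofList (whits ++ ehits)

-- ===== PRECONDITION & SPEC =====
def Spec_detect_ev_ids_and_hashes (text : String) (out : List String) : Prop := out = detect_ev_ids_and_hashes_alt text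
instance (text : String) (out : List String) : Decidable (Spec_detect_ev_ids_and_hashes text out) := by unfold Spec_detect_ev_ids_and_hashes; infer_instance

-- ===== CLAIM (what is proved, stated in full; the proofs are below) =====
def Claim_equal_detect_ev_ids_and_hashes : Prop := ∀ (text : String), Dom_detect_ev_ids_and_hashes text → Spec_detect_ev_ids_and_hashes text (detect_ev_ids_and_hashes text)

-- ===== LEMMAS AND PROOFS =====

-- the token "ev"+digits-or-hex test as a one-element list (what one word contributes)
def pvHitOpt (w : List Char) : List String :=
  let t := PySem.Str.stripChars (String.ofList w) pvPunct
  if pvHit t then [t] else []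

-- proof-side recursion equivalent to folding pvStepWord and flushing at the end
def pvWordScan : List Char → List Char → List String
  | word, [] => pvHitOpt word
  | word, c :: l =>
    if PySem.Chars.isspace c then pvHitOpt word ++ pvWordScan [] l
    else pvWordScan (word ++ [c]) l

-- proof-side recursion equivalent to folding pvStepEv and flushing at the end
def pvEvScan : List Char → List Char → List String
  | cand, [] => if 2 < cand.length then [String.ofList cand] else []
  | cand, c :: l =>
    if 2 ≤ cand.length then
      if PySem.Chars.isdigit c then pvEvScan (cand ++ [c]) l
      else (if 2 < cand.length then [String.ofList cand] else []) ++
        pvEvScan (if c = 'e' then ['e'] else []) l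
    else if cand = ['e'] ∧ c = 'v' then pvEvScan ['e', 'v'] l
    else pvEvScan (if c = 'e' then ['e'] else []) l

lemma pvFlush_eq (word : List Char) (whits : List String) :
    pvFlushWord word whits = whits ++ pvHitOpt word := by
  by_cases hp : pvHit (PySem.Str.stripChars (String.ofList word) pvPunct)
  · simp [pvFlushWord, pvHitOpt, hp]
  · simp [pvFlushWord, pvHitOpt, hp]

-- B's paired fold splits into the two component folds
lemma pvPairFold (l : List Char) (a : List Char × List String) (b : List Char × List String) :
    l.foldl (fun (st : (List Char × List String) × (List Char × List String)) c =>
      (pvStepWord st.1.1 st.1.2 c, pvStepEv st.2.1 st.2.2 c)) (a, b)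
    = (l.foldl (fun st c => pvStepWord st.1 st.2 c) a,
       l.foldl (fun st c => pvStepEv st.1 st.2 c) b) := by
  induction l generalizing a b with
  | nil => rfl
  | cons c l ih => simp only [List.foldl_cons, ih]

lemma pvWordFold (l : List Char) : ∀ (word : List Char) (whits : List String),
    pvFlushWord (l.foldl (fun (st : List Char × List String) c => pvStepWord st.1 st.2 c) (word, whits)).1
        (l.foldl (fun (st : List Char × List String) c => pvStepWord st.1 st.2 c) (word, whits)).2
      = whits ++ pvWordScan word l := by
  induction l with
  | nil => intro word whits; exact pvFlush_eq word whits
  | cons c l ih =>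
    intro word whits
    rw [List.foldl_cons]
    by_cases h : PySem.Chars.isspace c
    · rw [show pvStepWord word whits c = ([], pvFlushWord word whits) from by
        simp [pvStepWord, h]]
      rw [ih [] (pvFlushWord word whits), pvFlush_eq, List.append_assoc]
      simp [pvWordScan, h]
    · rw [show pvStepWord word whits c = (word ++ [c], whits) from by
        simp [pvStepWord, h]]
      rw [ih (word ++ [c]) whits]
      simp [pvWordScan, h]

lemma pvEvFold (l : List Char) : ∀ (cand : List Char) (ehits : List String),
    (if 2 < (l.foldl (fun (st : List Char × List String) c => pvStepEv st.1 st.2 c) (cand, ehits)).1.length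
     then (l.foldl (fun (st : List Char × List String) c => pvStepEv st.1 st.2 c) (cand, ehits)).2
        ++ [String.ofList (l.foldl (fun (st : List Char × List String) c => pvStepEv st.1 st.2 c) (cand, ehits)).1]
     else (l.foldl (fun (st : List Char × List String) c => pvStepEv st.1 st.2 c) (cand, ehits)).2)
      = ehits ++ pvEvScan cand l := by
  induction l with
  | nil =>
    intro cand ehits
    simp only [List.foldl_nil, pvEvScan]
    split_ifs <;> simp
  | cons c l ih =>
    intro cand ehits
    rw [List.foldl_cons]
    by_cases h1 : 2 ≤ cand.length
    · by_cases h2 : PySem.Chars.isdigit c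
      · rw [show pvStepEv cand ehits c = (cand ++ [c], ehits) from by simp [pvStepEv, h1, h2]]
        rw [ih (cand ++ [c]) ehits]
        simp [pvEvScan, h1, h2]
      · rw [show pvStepEv cand ehits c = ((if c = 'e' then ['e'] else []),
            if 2 < cand.length then ehits ++ [String.ofList cand] else ehits) from by
          simp [pvStepEv, h1, h2]]
        rw [ih _ _]
        have : pvEvScan cand (c :: l) = (if 2 < cand.length then [String.ofList cand] else []) ++
            pvEvScan (if c = 'e' then ['e'] else []) l := by
          simp [pvEvScan, h1, h2]
        rw [this]
        split_ifs with h4 <;> simp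
    · by_cases h3 : cand = ['e'] ∧ c = 'v'
      · rw [show pvStepEv cand ehits c = (['e', 'v'], ehits) from by simp [pvStepEv, h1, h3]]
        rw [ih ['e', 'v'] ehits]
        simp [pvEvScan, h1, h3]
      · rw [show pvStepEv cand ehits c = ((if c = 'e' then ['e'] else []), ehits) from by
          simp [pvStepEv, h1, h3]]
        rw [ih _ ehits]
        simp [pvEvScan, h1, h3]

-- ---- word side: the char-scan segmentation equals split₀ ----

lemma pvGoAcc (l : List Char) : ∀ (cur : List Char) (acc : List (List Char)),
    PySem.Chars.split₀.go l cur acc = acc.reverse ++ PySem.Chars.split₀.go l cur [] := by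
  induction l with
  | nil =>
    intro cur acc
    simp only [PySem.Chars.split₀.go]
    split_ifs <;> simp
  | cons c l ih =>
    intro cur acc
    simp only [PySem.Chars.split₀.go]
    split_ifs with h1 h2
    · rw [ih [] acc]
    · rw [ih [] (cur.reverse :: acc), ih [] [cur.reverse]]
      simp
    · exact ih (c :: cur) acc

lemma pvHitOpt_nil : pvHitOpt [] = [] := by decide

lemma pvWordScan_split (l : List Char) : ∀ (cur : List Char),
    pvWordScan cur l = (PySem.Chars.split₀.go l cur.reverse []).flatMap pvHitOpt := by
  induction l with
  | nil =>
    intro cur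
    simp only [pvWordScan, PySem.Chars.split₀.go, List.isEmpty_reverse]
    by_cases h : cur.isEmpty
    · simp [h, List.isEmpty_iff.mp h, pvHitOpt_nil]
    · simp [h]
  | cons c l ih =>
    intro cur
    simp only [pvWordScan, PySem.Chars.split₀.go, List.isEmpty_reverse]
    split_ifs with h1 h2
    · rw [List.isEmpty_iff.mp h2, ih []]
      simp [pvHitOpt_nil]
    · rw [List.reverse_reverse, pvGoAcc l [] [cur]]
      simp only [List.reverse_cons, List.reverse_nil, List.nil_append, List.flatMap_append,
        List.flatMap_cons, List.flatMap_nil, List.append_nil, List.reverse_reverse]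
      rw [ih []]
      rfl
    · rw [ih (cur ++ [c])]
      simp

-- A's token-loop body adds exactly the pvHitOpt contribution of the word
lemma pvAStep_eq (refs : List String) (raw : String) :
    (let tok := pvStripPunct raw
     if tok = "" then refs
     else if PySem.Str.startswith tok "ev" && PySem.Str.strIsdigit (PySem.Str.slice tok (some 2) none) then
       PySem.Set.add refs tok
     else if PySem.Str.len tok == 16 && tok.toList.all (fun c => pvHex.contains c) then
       PySem.Set.add refs tok
     else refs)
    = List.foldl PySem.Set.add refs (pvHitOpt raw.toList) := by
  have hstrip : pvStripPunct raw = PySem.Str.stripChars (String.ofList raw.toList) pvPunct := by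
    unfold pvStripPunct
    split_ifs with h
    · rw [h]; decide
    · rw [String.ofList_toList]
  unfold pvHitOpt pvHit
  rw [← hstrip]
  by_cases h0 : pvStripPunct raw = ""
  · simp [h0]
  · simp only [h0, if_false, beq_iff_eq, h0, Bool.not_eq_true']
    have hne : (pvStripPunct raw == "") = false := by simpa using h0
    rw [hne]
    simp only [Bool.not_false, Bool.true_and]
    cases h1 : (PySem.Str.startswith (pvStripPunct raw) "ev" &&
        PySem.Str.strIsdigit (PySem.Str.slice (pvStripPunct raw) (some 2) none)) <;>
      cases h2 : (PySem.Str.len (pvStripPunct raw) == 16 &&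
        (pvStripPunct raw).toList.all (fun c => pvHex.contains c)) <;>
      simp [h1, h2]

lemma pvPhase1 (ws : List String) (s : List String) :
    ws.foldl (fun refs raw =>
      let tok := pvStripPunct raw
      if tok = "" then refs
      else if PySem.Str.startswith tok "ev" && PySem.Str.strIsdigit (PySem.Str.slice tok (some 2) none) then
        PySem.Set.add refs tok
      else if PySem.Str.len tok == 16 && tok.toList.all (fun c => pvHex.contains c) then
        PySem.Set.add refs tok
      else refs) s
    = List.foldl PySem.Set.add s (ws.flatMap (fun w => pvHitOpt w.toList)) := by
  rw [List.foldl_flatMap]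
  exact PySem.List.foldl_congr_mem _ _ _ _ (fun acc _ _ => pvAStep_eq _ _)

-- ---- ev side: A's index walk equals the state machine ----

lemma pvEvScan_cons_nil (c : Char) (l : List Char) :
    pvEvScan [] (c :: l) = pvEvScan (if c = 'e' then ['e'] else []) l := by
  simp [pvEvScan]

lemma pvEvScan_short (l : List Char) (h : l.length ≤ 2) : pvEvScan [] l = [] := by
  match l, h with
  | [], _ => rfl
  | [a], _ =>
    simp only [pvEvScan]
    split_ifs <;> (try rfl) <;> simp_all [pvEvScan]
  | [a, b], _ =>
    simp only [pvEvScan]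
    split_ifs <;> (try rfl) <;> simp_all [pvEvScan]

lemma pvSkip_le (cl : List Char) (n j : Nat) : j ≤ pvSkipDigits cl n j := by
  induction j using pvSkipDigits.induct cl n with
  | case1 j h ih => rw [pvSkipDigits, dif_pos h]; omega
  | case2 j h => rw [pvSkipDigits, dif_neg h]

lemma pvSkip_le_n (cl : List Char) (n j : Nat) (h : j ≤ n) : pvSkipDigits cl n j ≤ n := by
  induction j using pvSkipDigits.induct cl n with
  | case1 j h' ih => rw [pvSkipDigits, dif_pos h']; exact ih (by omega)
  | case2 j h' => rw [pvSkipDigits, dif_neg h']; exact h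

-- running the machine from state 'ev'+ds consumes exactly the digit run that pvSkipDigits skips
lemma pvDropCons (cl : List Char) (j : Nat) (hj : j < cl.length) :
    cl.drop j = cl.getD j ' ' :: cl.drop (j + 1) := by
  rw [List.getD_eq_getElem cl ' ' hj]
  exact List.drop_eq_getElem_cons hj

lemma pvScanSkip (cl : List Char) : ∀ (k : Nat), k ≤ cl.length → ∀ (ds : List Char),
    pvEvScan ('e' :: 'v' :: ds) (cl.drop k) =
      (if ds ++ (cl.drop k).take (pvSkipDigits cl cl.length k - k) ≠ [] then
         [String.ofList ('e' :: 'v' :: (ds ++ (cl.drop k).take (pvSkipDigits cl cl.length k - k)))]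
       else []) ++ pvEvScan [] (cl.drop (pvSkipDigits cl cl.length k)) := by
  intro k
  induction k using pvSkipDigits.induct cl cl.length with
  | case1 j h ih =>
    intro hk ds
    rw [pvSkipDigits, dif_pos h]
    have hle : j + 1 ≤ pvSkipDigits cl cl.length (j + 1) := pvSkip_le cl cl.length (j + 1)
    have hdrop : cl.drop j = cl.getD j ' ' :: cl.drop (j + 1) := pvDropCons cl j h.1
    rw [hdrop]
    have h2 : PySem.Chars.isdigit (cl[j]?.getD ' ') = true := by
      rw [← List.getD_eq_getElem?_getD]; exact h.2
    rw [show pvEvScan ('e' :: 'v' :: ds) (cl.getD j ' ' :: cl.drop (j + 1))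
          = pvEvScan ('e' :: 'v' :: (ds ++ [cl.getD j ' '])) (cl.drop (j + 1)) from by
      simp [pvEvScan, h2]]
    rw [ih (by omega) (ds ++ [cl.getD j ' '])]
    have harith : pvSkipDigits cl cl.length (j + 1) - j
        = (pvSkipDigits cl cl.length (j + 1) - (j + 1)) + 1 := by omega
    rw [harith, List.take_succ_cons]
    simp [List.append_assoc]
  | case2 j h =>
    intro hk ds
    rw [pvSkipDigits, dif_neg h]
    simp only [Nat.sub_self, List.take_zero, List.append_nil]
    have hcond : (2 < ('e' :: 'v' :: ds).length) ↔ ds ≠ [] := by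
      cases ds <;> simp
    rcases Nat.lt_or_ge j cl.length with hj | hj
    · have hnd : PySem.Chars.isdigit (cl[j]?.getD ' ') = false := by
        rw [← List.getD_eq_getElem?_getD]
        exact Bool.eq_false_iff.mpr (fun hd => h ⟨hj, hd⟩)
      rw [pvDropCons cl j hj, pvEvScan_cons_nil]
      rw [show pvEvScan ('e' :: 'v' :: ds) (cl.getD j ' ' :: cl.drop (j + 1))
            = (if 2 < ('e' :: 'v' :: ds).length then [String.ofList ('e' :: 'v' :: ds)] else []) ++
              pvEvScan (if cl.getD j ' ' = 'e' then ['e'] else []) (cl.drop (j + 1)) from by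
        simp [pvEvScan, hnd]]
      by_cases hds : ds = []
      · simp [hds]
      · simp [hds, List.length_pos_iff]
    · have hj' : j = cl.length := by omega
      rw [hj', List.drop_length]
      by_cases hds : ds = []
      · simp [hds, pvEvScan]
      · simp [pvEvScan, hds, List.length_pos_iff]

lemma pvLoopA_scan_aux (cl : List Char) : ∀ (m i : Nat) (refs : List String), cl.length - i ≤ m →
    pvLoopA cl cl.length i refs = List.foldl PySem.Set.add refs (pvEvScan [] (cl.drop i)) := by
  intro m
  induction m with
  | zero =>
    intro i refs hm
    rw [pvLoopA, dif_neg (by omega)]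
    rw [List.drop_eq_nil_of_le (by omega)]
    simp [pvEvScan]
  | succ m ih =>
    intro i refs hm
    by_cases hcase : i < cl.length - 2
    · have hi0 : i < cl.length := by omega
      have hi1 : i + 1 < cl.length := by omega
      have hd0 : cl.drop i = cl.getD i ' ' :: cl.drop (i + 1) := pvDropCons cl i hi0
      have hd1 : cl.drop (i + 1) = cl.getD (i + 1) ' ' :: cl.drop (i + 2) := pvDropCons cl (i + 1) hi1
      rw [pvLoopA, dif_pos hcase]
      by_cases hev : cl.getD i ' ' = 'e' ∧ cl.getD (i + 1) ' ' = 'v'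
      · rw [if_pos hev]
        have hscan0 : pvEvScan [] (cl.drop i) = pvEvScan ['e', 'v'] (cl.drop (i + 2)) := by
          rw [hd0, pvEvScan_cons_nil, hev.1, if_pos rfl, hd1, hev.2]
          simp [pvEvScan]
        have hj2 : i + 2 ≤ pvSkipDigits cl cl.length (i + 2) := pvSkip_le cl cl.length (i + 2)
        have hjn : pvSkipDigits cl cl.length (i + 2) ≤ cl.length :=
          pvSkip_le_n cl cl.length (i + 2) (by omega)
        have hskip := pvScanSkip cl (i + 2) (by omega) []
        rw [List.nil_append] at hskip
        have htklen : ((cl.drop (i + 2)).take (pvSkipDigits cl cl.length (i + 2) - (i + 2))).length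
            = pvSkipDigits cl cl.length (i + 2) - (i + 2) := by
          rw [List.length_take, List.length_drop]
          omega
        by_cases hj : i + 2 < pvSkipDigits cl cl.length (i + 2)
        · rw [dif_pos hj]
          have hne : (cl.drop (i + 2)).take (pvSkipDigits cl cl.length (i + 2) - (i + 2)) ≠ [] := by
            intro hnil
            rw [hnil] at htklen
            simp at htklen
            omega
          rw [if_pos hne] at hskip
          have hfull : (cl.drop i).take (pvSkipDigits cl cl.length (i + 2) - i)
              = 'e' :: 'v' :: (cl.drop (i + 2)).take (pvSkipDigits cl cl.length (i + 2) - (i + 2)) := by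
            rw [hd0, hev.1,
              show pvSkipDigits cl cl.length (i + 2) - i
                = (pvSkipDigits cl cl.length (i + 2) - (i + 1)) + 1 from by omega,
              List.take_succ_cons, hd1, hev.2,
              show pvSkipDigits cl cl.length (i + 2) - (i + 1)
                = (pvSkipDigits cl cl.length (i + 2) - (i + 2)) + 1 from by omega,
              List.take_succ_cons]
          rw [hscan0, hskip, hfull]
          rw [List.cons_append, List.nil_append, List.foldl_cons]
          exact ih (pvSkipDigits cl cl.length (i + 2)) _ (by omega)
        · rw [dif_neg hj]
          have hjeq : pvSkipDigits cl cl.length (i + 2) = i + 2 := by omega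
          rw [hjeq] at hskip
          simp only [Nat.sub_self, List.take_zero, ne_eq, not_true_eq_false] at hskip
          rw [ih (i + 1) refs (by omega)]
          rw [hscan0, hskip]
          rw [hd1, pvEvScan_cons_nil, hev.2]
          rw [if_neg (by decide)]
          simp
      · rw [if_neg hev]
        rw [ih (i + 1) refs (by omega)]
        congr 1
        rw [hd0, pvEvScan_cons_nil]
        by_cases he : cl.getD i ' ' = 'e'
        · rw [if_pos he]
          have hv : cl.getD (i + 1) ' ' ≠ 'v' := fun hc => hev ⟨he, hc⟩
          rw [hd1, pvEvScan_cons_nil]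
          rw [show pvEvScan ['e'] (cl.getD (i + 1) ' ' :: cl.drop (i + 2))
                = pvEvScan (if cl.getD (i + 1) ' ' = 'e' then ['e'] else []) (cl.drop (i + 2)) from by
            simp [pvEvScan, ← List.getD_eq_getElem?_getD, hv]]
        · rw [if_neg he]
    · rw [pvLoopA, dif_neg hcase]
      rw [pvEvScan_short _ (by rw [List.length_drop]; omega)]
      rfl

lemma pvLoopA_scan (cl : List Char) (i : Nat) (refs : List String) :
    pvLoopA cl cl.length i refs = List.foldl PySem.Set.add refs (pvEvScan [] (cl.drop i)) :=
  pvLoopA_scan_aux cl cl.length i refs (by omega)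

lemma pvW_bridge (s : String) :
    (PySem.Str.split₀ s).flatMap (fun w => pvHitOpt w.toList) = pvWordScan [] s.toList := by
  rw [pvWordScan_split _ []]
  rw [show ([] : List Char).reverse = [] from rfl]
  rw [show PySem.Chars.split₀.go s.toList [] [] = PySem.Chars.split₀ s.toList from rfl]
  rw [← PySem.Str.split₀_map_toList, List.flatMap_map]

lemma pvAlt_empty : detect_ev_ids_and_hashes_alt "" = [] := by decide

-- ===== VERDICT (by name: the statement is the Claim_ definition above) =====
theorem detect_ev_ids_and_hashes_spec : Claim_equal_detect_ev_ids_and_hashes := by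
  intro text _hdom
  unfold Spec_detect_ev_ids_and_hashes
  by_cases ht : text = ""
  · subst ht; rw [pvAlt_empty]; rfl
  · unfold detect_ev_ids_and_hashes detect_ev_ids_and_hashes_alt
    rw [if_neg ht]
    simp only [pvPairFold]
    rw [pvWordFold, pvEvFold]
    simp only [List.nil_append]
    rw [PySem.Set.ofList_eq_foldl, List.foldl_append]
    rw [pvPhase1, pvW_bridge, pvLoopA_scan, List.drop_zero]
    rfl
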